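-- pv_equiv track=rewrite | github.com/0xbyte0/tictactoe.sol | scripts/deploy.py | format_game
-- ===== SOURCE A (Python) =====
-- def format_game(game):
--     out = ""
--     for x in range(1, 22):
--         if x < 19:
--             out += str((game >> (x-1)) & 0x1)
--             if x % 6 == 0:
--                 out += "\n"
--             elif x % 2 == 0:
--                 out += " "
--
--     return out
-- ===== SOURCE B (Python) =====
-- def format_game(game):
--     bits = [str((game >> i) & 1) for i in range(18)]
--     out = ""
--     for r in range(3):
--         p0, p1, p2, p3, p4, p5 = bits[6*r:6*r+6]
--         out += " ".join([p0 + p1, p2 + p3, p4 + p5]) + "\n"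
--     return out
-- ===== Notes on version B (the rewrite author's own statement) =====
-- stated objective: alternative
-- what changed: B first materializes the relevant low bits of the game as a list, then reshapes that list row by row, slicing each row and joining its bit-pairs with a space plus a trailing newline, instead of A's single flat counter loop choosing separators by modular tests on the counter.
import Mathlib
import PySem

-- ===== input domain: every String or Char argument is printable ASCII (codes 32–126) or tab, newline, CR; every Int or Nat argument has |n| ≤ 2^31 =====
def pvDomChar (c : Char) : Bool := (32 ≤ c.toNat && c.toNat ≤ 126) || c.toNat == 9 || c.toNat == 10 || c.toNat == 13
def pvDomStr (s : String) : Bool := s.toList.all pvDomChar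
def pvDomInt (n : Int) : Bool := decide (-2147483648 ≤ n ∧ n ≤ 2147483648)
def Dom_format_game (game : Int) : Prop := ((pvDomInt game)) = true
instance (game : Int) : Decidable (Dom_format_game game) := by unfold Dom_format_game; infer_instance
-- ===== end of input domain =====

-- B materializes the LSB-first bit list once and reshapes it as a grid (rows sliced, pairs joined) instead of A's flat counter loop with modular separator tests; objective: alternative decomposition.

-- ===== PORT A =====
-- (game >> (x-1)) & 1 : shift amount x-1 is ≥ 0 for every x the branch reaches (x ∈ 1..18), so (x-1).toNat is exact
def format_game (game : Int) : String :=
  (PySem.List.pyRange 1 22 1).foldl (fun out (x : Int) =>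
    if x < 19 then
      let out := out ++ PySem.Int.toStr (PySem.Int.band (Int.shiftRight game (x - 1).toNat) 1)
      if PySem.Int.mod x 6 == 0 then out ++ "\n"
      else if PySem.Int.mod x 2 == 0 then out ++ " "
      else out
    else out) ""

-- ===== PORT B =====
-- bits = [str((game >> i) & 1) for i in range(18)]; i ≥ 0 throughout, so i.toNat is exact
def format_game_alt (game : Int) : String :=
  let bits : List String :=
    (PySem.List.pyRange 0 18 1).map (fun i => PySem.Int.toStr (PySem.Int.band (Int.shiftRight game i.toNat) 1))
  (PySem.List.pyRange 0 3 1).foldl (fun out r =>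
    let row := PySem.List.slice bits (some (6 * r)) (some (6 * r + 6))
    -- p0..p5 unpack row; the slice always has 6 elements, so the fallback branch is unreachable
    match row with
    | [p0, p1, p2, p3, p4, p5] =>
        out ++ (PySem.Str.join " " [p0 ++ p1, p2 ++ p3, p4 ++ p5] ++ "\n")
    | _ => out) ""

-- ===== PRECONDITION & SPEC =====
def Spec_format_game (game : Int) (out : String) : Prop := out = format_game_alt game
instance (game : Int) (out : String) : Decidable (Spec_format_game game out) := by unfold Spec_format_game; infer_instance

-- ===== CLAIM (what is proved, stated in full; the proofs are below) =====
def Claim_equal_format_game : Prop := ∀ (game : Int), Dom_format_game game → Spec_format_game game (format_game game)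

-- ===== LEMMAS AND PROOFS =====
theorem pv_expand : PySem.List.pyRange 1 22 1 = [1,2,3,4,5,6,7,8,9,10,11,12,13,14,15,16,17,18,19,20,21] := by decide

theorem pv_expandB : PySem.List.pyRange 0 18 1 = [0,1,2,3,4,5,6,7,8,9,10,11,12,13,14,15,16,17] := by decide

theorem pv_expandR : PySem.List.pyRange 0 3 1 = [0,1,2] := by decide

-- ===== VERDICT (by name: the statement is the Claim_ definition above) =====
theorem format_game_spec : Claim_equal_format_game := by
  intro game _
  unfold Spec_format_game format_game format_game_alt
  have hinj : ∀ a b : String, a.toList = b.toList → a = b := by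
    intro a b h
    have := congrArg String.ofList h
    simpa using this
  apply hinj
  simp [pv_expand, pv_expandB, pv_expandR, PySem.List.slice, PySem.Str.join, PySem.Int.mod,
        List.foldl, String.toList_append, PySem.Int.toStr, PySem.Chars.join, List.intercalate, List.append_assoc,
        Int.toNat_zero]
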